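-- pv_equiv track=rewrite | github.com/yifanyin11/partnr-planner | scripts/hitl_analysis/preprocess_data.py | count_empty_dicts
-- ===== SOURCE A (Python) =====
-- def count_empty_dicts(dict_list):
--     """
--     Count intermediate empty dicts in a list of dicts.
--     Since the HITL session consists of many frames where nothing happens, the recorded
--     frames are empty. This function counts the in-between empty dicts.
--     """
--     counts = []
--     empty_count = 0
--
--     for dictionary in dict_list:
--         if dictionary:
--             if empty_count > 0:
--                 counts.append(empty_count)
--                 empty_count = 0
--         else:
--             empty_count += 1
--
--     if empty_count > 0:
--         counts.append(empty_count)
--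
--     return counts
-- ===== SOURCE B (Python) =====
-- def count_empty_dicts(dict_list):
--     """Gap arithmetic: the empty runs are the gaps between consecutive
--     non-empty positions (with virtual sentinels at -1 and len)."""
--     idx = [i for i, d in enumerate(dict_list) if d]
--     bounds = [-1] + idx + [len(dict_list)]
--     return [b - a - 1 for a, b in zip(bounds, bounds[1:]) if b - a > 1]
-- ===== Notes on version B (the rewrite author's own statement) =====
-- stated objective: alternative
-- what changed: Replaces A's running empty_count that is flushed at each non-empty boundary with gap arithmetic: collect the indices of non-empty dicts, add sentinels -1 and len, and emit each consecutive gap minus one when positive.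
import Mathlib
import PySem

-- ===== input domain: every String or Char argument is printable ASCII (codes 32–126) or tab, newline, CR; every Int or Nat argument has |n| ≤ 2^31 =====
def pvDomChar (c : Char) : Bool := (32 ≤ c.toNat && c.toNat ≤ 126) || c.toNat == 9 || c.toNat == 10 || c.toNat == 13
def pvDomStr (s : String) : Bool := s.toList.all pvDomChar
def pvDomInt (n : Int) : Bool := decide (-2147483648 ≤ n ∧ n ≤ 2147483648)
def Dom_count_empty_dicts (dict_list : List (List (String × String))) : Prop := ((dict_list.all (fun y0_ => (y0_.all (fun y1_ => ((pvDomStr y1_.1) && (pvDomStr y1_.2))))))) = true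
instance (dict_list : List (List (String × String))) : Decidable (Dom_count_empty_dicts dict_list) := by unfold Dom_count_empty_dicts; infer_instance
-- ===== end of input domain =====

-- B replaces A's flush-on-boundary counter with gap arithmetic over the indices of
-- non-empty dicts (same cost; different algorithm).

-- ===== PORT A =====
-- the for-loop over dict_list with state (counts, empty_count), then the final flush
def count_empty_dicts_loop : List (List (String × String)) → List Int → Int → List Int
  | [], counts, empty_count =>
      if empty_count > 0 then counts ++ [empty_count] else counts
  | dictionary :: rest, counts, empty_count =>
      if !dictionary.isEmpty then
        if empty_count > 0 then count_empty_dicts_loop rest (counts ++ [empty_count]) 0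
        else count_empty_dicts_loop rest counts 0
      else
        count_empty_dicts_loop rest counts (empty_count + 1)

def count_empty_dicts (dict_list : List (List (String × String))) : List Int :=
  count_empty_dicts_loop dict_list [] 0

-- ===== PORT B =====
def count_empty_dicts_alt (dict_list : List (List (String × String))) : List Int :=
  -- idx = [i for i, d in enumerate(dict_list) if d]
  let idx : List Int :=
    (PySem.List.enumerate dict_list 0).filterMap
      (fun p => if !p.2.isEmpty then some p.1 else none)
  -- bounds = [-1] + idx + [len(dict_list)]
  let bounds : List Int := -1 :: (idx ++ [(dict_list.length : Int)])
  -- [b - a - 1 for a, b in zip(bounds, bounds[1:]) if b - a > 1]   (bounds[1:] = tail)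
  (bounds.zip bounds.tail).filterMap
    (fun p => if p.2 - p.1 > 1 then some (p.2 - p.1 - 1) else none)

-- ===== PRECONDITION & SPEC =====
def Spec_count_empty_dicts (dict_list : List (List (String × String))) (out : List Int) : Prop := out = count_empty_dicts_alt dict_list
instance (dict_list : List (List (String × String))) (out : List Int) : Decidable (Spec_count_empty_dicts dict_list out) := by unfold Spec_count_empty_dicts; infer_instance

-- ===== CLAIM (what is proved, stated in full; the proofs are below) =====
def Claim_equal_count_empty_dicts : Prop := ∀ (dict_list : List (List (String × String))), Dom_count_empty_dicts dict_list → Spec_count_empty_dicts dict_list (count_empty_dicts dict_list)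

-- ===== LEMMAS AND PROOFS =====

-- canonical recursion both sides are reduced to: pending-empties counter, no accumulator
def pvBrec : List (List (String × String)) → Int → List Int
  | [], ec => if ec > 0 then [ec] else []
  | d :: t, ec =>
      if !d.isEmpty then (if ec > 0 then ec :: pvBrec t 0 else pvBrec t 0)
      else pvBrec t (ec + 1)

theorem pvALoop_eq_brec (l : List (List (String × String))) (counts : List Int) (ec : Int) :
    count_empty_dicts_loop l counts ec = counts ++ pvBrec l ec := by
  induction l generalizing counts ec with
  | nil => simp only [count_empty_dicts_loop, pvBrec]; split <;> simp
  | cons d t ih =>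
      simp only [count_empty_dicts_loop, pvBrec]
      by_cases hd : d.isEmpty <;> simp [hd]
      · exact ih counts (ec + 1)
      · by_cases hec : ec > 0 <;> simp [hec, ih]

def pvPairsOut (bs : List Int) : List Int :=
  (bs.zip bs.tail).filterMap (fun p => if p.2 - p.1 > 1 then some (p.2 - p.1 - 1) else none)

def pvIdxF (l : List (List (String × String))) (k : Int) : List Int :=
  (PySem.List.enumerate l k).filterMap (fun p => if !p.2.isEmpty then some p.1 else none)

theorem pvMain (l : List (List (String × String))) (k p : Int) :
    pvPairsOut (p :: (pvIdxF l k ++ [k + l.length])) = pvBrec l (k - p - 1) := by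
  induction l generalizing k p with
  | nil =>
      simp only [pvIdxF, PySem.List.enumerate_nil, List.filterMap_nil, List.nil_append,
        List.length_nil, pvPairsOut, pvBrec]
      simp only [List.tail_cons, List.zip_cons_cons, List.zip_nil_right, List.filterMap_cons,
        List.filterMap_nil, Nat.cast_zero, add_zero]
      split_ifs with h1 h2 h2 <;> first | rfl | omega
  | cons d t ih =>
      have hlen : k + ((d :: t).length : Int) = (k + 1) + (t.length : Int) := by
        simp; omega
      simp only [pvIdxF, PySem.List.enumerate_cons, List.filterMap_cons, hlen]
      by_cases hd : d.isEmpty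
      · have := ih (k + 1) p
        simp only [pvIdxF] at this
        have harg : k + 1 - p - 1 = (k - p - 1) + 1 := by omega
        simp only [hd, pvBrec, Bool.not_true, Bool.false_eq_true, if_false]
        rw [this, harg]
      · have hsplit : pvPairsOut (p :: k :: (pvIdxF t (k + 1) ++ [k + 1 + (t.length : Int)]))
            = (if k - p > 1 then [k - p - 1] else [])
              ++ pvPairsOut (k :: (pvIdxF t (k + 1) ++ [k + 1 + (t.length : Int)])) := by
          simp only [pvPairsOut, List.tail_cons, List.zip_cons_cons, List.filterMap_cons]
          split_ifs <;> simp
        simp only [pvIdxF] at hsplit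
        have ih2 := ih (k + 1) k
        simp only [pvIdxF] at ih2
        simp only [hd, Bool.not_false, if_true, List.cons_append]
        rw [hsplit, ih2]
        have harg : k + 1 - k - 1 = (0 : Int) := by omega
        rw [harg]
        simp only [pvBrec, hd, Bool.not_false, if_true]
        split_ifs with h1 h2 h2 <;> simp <;> omega

-- ===== VERDICT (by name: the statement is the Claim_ definition above) =====
theorem count_empty_dicts_spec : Claim_equal_count_empty_dicts := by
  intro l _
  show count_empty_dicts l = count_empty_dicts_alt l
  have hB : count_empty_dicts_alt l
      = pvPairsOut ((-1 : Int) :: (pvIdxF l 0 ++ [(0 : Int) + (l.length : Int)])) := by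
    simp [count_empty_dicts_alt, pvPairsOut, pvIdxF]
  rw [hB, pvMain l 0 (-1), count_empty_dicts, pvALoop_eq_brec]
  norm_num
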